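-- pv_equiv track=rewrite | github.com/SulaymanB2024/cuddly-waffle | seo_audit/page_controls.py | _most_restrictive_image_preview
-- ===== SOURCE A (Python) =====
-- _IMAGE_PREVIEW_RANK = {
--     "none": 0,
--     "standard": 1,
--     "large": 2,
-- }
--
-- def _most_restrictive_image_preview(values: list[str]) -> str:
--     if not values:
--         return ""
--
--     ranked: list[tuple[int, str]] = []
--     for value in values:
--         normalized = value.strip().lower()
--         if normalized in _IMAGE_PREVIEW_RANK:
--             ranked.append((_IMAGE_PREVIEW_RANK[normalized], normalized))
--
--     if ranked:
--         ranked.sort(key=lambda item: item[0])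
--         return ranked[0][1]
--
--     return values[0].strip().lower()
-- ===== SOURCE B (Python) =====
-- def _most_restrictive_image_preview(values: list[str]) -> str:
--     if not values:
--         return ""
--     normalized = [v.strip().lower() for v in values]
--     for name in ("none", "standard", "large"):
--         if name in normalized:
--             return name
--     return normalized[0]
-- ===== Notes on version B (the rewrite author's own statement) =====
-- stated objective: simpler
-- what changed: Instead of collecting (rank, name) pairs and sorting them to pick the minimum, B normalizes once and walks the fixed priority table none/standard/large, returning the first name present; the fallback is the first normalized value.
import Mathlib
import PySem

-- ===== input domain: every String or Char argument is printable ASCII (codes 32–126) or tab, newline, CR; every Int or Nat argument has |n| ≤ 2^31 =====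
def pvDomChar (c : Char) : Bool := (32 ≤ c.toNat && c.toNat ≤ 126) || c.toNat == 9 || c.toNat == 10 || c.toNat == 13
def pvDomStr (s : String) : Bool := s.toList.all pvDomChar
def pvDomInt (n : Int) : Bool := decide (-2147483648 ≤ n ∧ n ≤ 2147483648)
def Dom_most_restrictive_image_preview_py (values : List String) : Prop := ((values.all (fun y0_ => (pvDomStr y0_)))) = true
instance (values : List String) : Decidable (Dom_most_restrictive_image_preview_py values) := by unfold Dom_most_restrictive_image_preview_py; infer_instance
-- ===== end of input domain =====

-- B replaces A's collect-pairs-then-sort with a single normalization pass and a walk of the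
-- fixed priority table none/standard/large (objective: simpler); same return value everywhere.

-- ===== PORT A =====
-- _IMAGE_PREVIEW_RANK = {"none": 0, "standard": 1, "large": 2}
def pvRankDict : PySem.Dict String Int :=
  PySem.Dict.ofList [("none", 0), ("standard", 1), ("large", 2)]

-- value.strip().lower()  (helper shared by both ports, as in both Pythons)
def pvNorm (v : String) : String := PySem.Str.lower (PySem.Str.strip v)

def most_restrictive_image_preview_py (values : List String) : String :=
  if values = [] then ""
  else
    let ranked : List (Int × String) :=
      values.foldl (fun acc value =>
        let normalized := pvNorm value
        if pvRankDict.contains normalized then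
          acc ++ [(pvRankDict.getD normalized 0, normalized)]
        else acc) []
    if ranked ≠ [] then
      ((PySem.List.sorted ranked (fun item => item.1) false).headD (0, "")).2
    else
      pvNorm (values.headD "")

-- ===== PORT B =====
def most_restrictive_image_preview_py_alt (values : List String) : String :=
  match values with
  | [] => ""
  | v :: vs =>
    let normalized := (v :: vs).map pvNorm
    if "none" ∈ normalized then "none"
    else if "standard" ∈ normalized then "standard"
    else if "large" ∈ normalized then "large"
    else pvNorm v

-- ===== PRECONDITION & SPEC =====
def Spec_most_restrictive_image_preview_py (values : List String) (out : String) : Prop := out = most_restrictive_image_preview_py_alt values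
instance (values : List String) (out : String) : Decidable (Spec_most_restrictive_image_preview_py values out) := by unfold Spec_most_restrictive_image_preview_py; infer_instance

-- ===== CLAIM (what is proved, stated in full; the proofs are below) =====
def Claim_equal_most_restrictive_image_preview_py : Prop := ∀ (values : List String), Dom_most_restrictive_image_preview_py values → Spec_most_restrictive_image_preview_py values (most_restrictive_image_preview_py values)

-- ===== LEMMAS AND PROOFS =====

-- the per-element content of A's loop, as a filterMap step
def pvG (v : String) : Option (Int × String) :=
  match pvRankDict.get? (pvNorm v) with
  | some r => some (r, pvNorm v)
  | none => none

lemma pvRankDict_get? (n : String) :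
    pvRankDict.get? n =
      if "none" = n then some 0 else if "standard" = n then some 1
      else if "large" = n then some 2 else none := by
  have h : pvRankDict = PySem.Dict.mk [("none", 0), ("standard", 1), ("large", 2)] := by decide
  rw [h]
  simp only [PySem.Dict.get?_mk_cons, beq_iff_eq]
  split_ifs <;> simp [PySem.Dict.get?]

lemma pvRanked_eq (values : List String) (acc : List (Int × String)) :
    values.foldl (fun acc value =>
        let normalized := pvNorm value
        if pvRankDict.contains normalized then
          acc ++ [(pvRankDict.getD normalized 0, normalized)]
        else acc) acc = acc ++ values.filterMap pvG := by
  induction values generalizing acc with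
  | nil => simp
  | cons v vs ih =>
    rw [List.foldl_cons, List.filterMap_cons, ih]
    show (if pvRankDict.contains (pvNorm v) then acc ++ [(pvRankDict.getD (pvNorm v) 0, pvNorm v)] else acc) ++ vs.filterMap pvG = _
    rw [pvG.eq_def]
    generalize pvNorm v = n
    rw [PySem.Dict.contains_eq_isSome_get?, PySem.Dict.getD_eq_get?_getD, pvRankDict_get?]
    split_ifs <;> simp_all

lemma pvG_eq_some (v : String) (p : Int × String) :
    pvG v = some p ↔
      (pvNorm v = "none" ∧ p = (0, "none")) ∨ (pvNorm v = "standard" ∧ p = (1, "standard"))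
      ∨ (pvNorm v = "large" ∧ p = (2, "large")) := by
  unfold pvG
  rw [pvRankDict_get?]
  split_ifs with h1 h2 h3
  · simp [← h1]
    exact eq_comm
  · simp [← h2]
    exact eq_comm
  · simp [← h3]
    exact eq_comm
  · constructor
    · intro h; exact h.elim
    · rintro (⟨h, _⟩ | ⟨h, _⟩ | ⟨h, _⟩)
      · exact absurd h.symm h1
      · exact absurd h.symm h2
      · exact absurd h.symm h3

lemma pv_mem_ranked (values : List String) (p : Int × String) :
    p ∈ values.filterMap pvG ↔
      (p = (0, "none") ∧ "none" ∈ values.map pvNorm)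
      ∨ (p = (1, "standard") ∧ "standard" ∈ values.map pvNorm)
      ∨ (p = (2, "large") ∧ "large" ∈ values.map pvNorm) := by
  simp only [List.mem_filterMap, List.mem_map, pvG_eq_some]
  constructor
  · rintro ⟨v, hv, (⟨hn, hp⟩ | ⟨hn, hp⟩ | ⟨hn, hp⟩)⟩
    · exact Or.inl ⟨hp, v, hv, hn⟩
    · exact Or.inr (Or.inl ⟨hp, v, hv, hn⟩)
    · exact Or.inr (Or.inr ⟨hp, v, hv, hn⟩)
  · rintro (⟨hp, v, hv, hn⟩ | ⟨hp, v, hv, hn⟩ | ⟨hp, v, hv, hn⟩)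
    · exact ⟨v, hv, Or.inl ⟨hn, hp⟩⟩
    · exact ⟨v, hv, Or.inr (Or.inl ⟨hn, hp⟩)⟩
    · exact ⟨v, hv, Or.inr (Or.inr ⟨hn, hp⟩)⟩

-- ===== VERDICT (by name: the statement is the Claim_ definition above) =====
theorem most_restrictive_image_preview_py_spec : Claim_equal_most_restrictive_image_preview_py := by
  intro values _
  unfold Spec_most_restrictive_image_preview_py
  match values with
  | [] => rfl
  | v :: vs =>
    unfold most_restrictive_image_preview_py most_restrictive_image_preview_py_alt
    rw [if_neg (List.cons_ne_nil v vs), pvRanked_eq]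
    rw [List.nil_append]
    show (if (v :: vs).filterMap pvG ≠ [] then
            ((PySem.List.sorted ((v :: vs).filterMap pvG) (fun item => item.1) false).headD (0, "")).2
          else pvNorm ((v :: vs).headD "")) =
        if "none" ∈ List.map pvNorm (v :: vs) then "none"
        else if "standard" ∈ List.map pvNorm (v :: vs) then "standard"
        else if "large" ∈ List.map pvNorm (v :: vs) then "large" else pvNorm v
    set R := (v :: vs).filterMap pvG with hR
    by_cases hempty : R = []
    · -- no recognized value: both fall back to pvNorm v
      have hnone : ¬ "none" ∈ (v :: vs).map pvNorm := fun h => by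
        have : (0, "none") ∈ R := (pv_mem_ranked _ _).mpr (Or.inl ⟨rfl, h⟩)
        rw [hempty] at this
        exact List.not_mem_nil this
      have hstd : ¬ "standard" ∈ (v :: vs).map pvNorm := fun h => by
        have : (1, "standard") ∈ R := (pv_mem_ranked _ _).mpr (Or.inr (Or.inl ⟨rfl, h⟩))
        rw [hempty] at this
        exact List.not_mem_nil this
      have hlg : ¬ "large" ∈ (v :: vs).map pvNorm := fun h => by
        have : (2, "large") ∈ R := (pv_mem_ranked _ _).mpr (Or.inr (Or.inr ⟨rfl, h⟩))
        rw [hempty] at this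
        exact List.not_mem_nil this
      rw [if_neg (not_not_intro hempty), if_neg hnone, if_neg hstd, if_neg hlg, List.headD_cons]
    · have hsne : PySem.List.sorted R (fun item => item.1) false ≠ [] := by
        simpa [PySem.List.sorted_eq_nil_iff] using hempty
      obtain ⟨m, t, hs⟩ := List.exists_cons_of_ne_nil hsne
      have hmem : m ∈ R := by
        rw [← PySem.List.mem_sorted (key := fun item => item.1) (rev := false), hs]
        exact List.mem_cons_self
      have hle : ∀ y ∈ R, m.1 ≤ y.1 := PySem.List.key_head_sorted_le R (fun item => item.1) hs
      have hm := (pv_mem_ranked (v :: vs) m).mp hmem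
      rw [if_pos hempty, hs, List.headD_cons]
      by_cases hn : "none" ∈ (v :: vs).map pvNorm
      · have h0 : (0, "none") ∈ R := (pv_mem_ranked _ _).mpr (Or.inl ⟨rfl, hn⟩)
        have := hle _ h0
        have hm0 : m = (0, "none") := by
          rcases hm with ⟨h, _⟩ | ⟨h, _⟩ | ⟨h, _⟩ <;> subst h <;> first | rfl | omega
        rw [if_pos hn, hm0]
      · by_cases hstd : "standard" ∈ (v :: vs).map pvNorm
        · have h1 : (1, "standard") ∈ R := (pv_mem_ranked _ _).mpr (Or.inr (Or.inl ⟨rfl, hstd⟩))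
          have := hle _ h1
          have hm1 : m = (1, "standard") := by
            rcases hm with ⟨h, hmm⟩ | ⟨h, _⟩ | ⟨h, _⟩ <;> subst h
            · exact absurd hmm hn
            · rfl
            · omega
          rw [if_neg hn, if_pos hstd, hm1]
        · have hlg : "large" ∈ (v :: vs).map pvNorm := by
            rcases hm with ⟨_, hmm⟩ | ⟨_, hmm⟩ | ⟨_, hmm⟩
            · exact absurd hmm hn
            · exact absurd hmm hstd
            · exact hmm
          have hm2 : m = (2, "large") := by
            rcases hm with ⟨h, hmm⟩ | ⟨h, hmm⟩ | ⟨h, _⟩ <;> subst h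
            · exact absurd hmm hn
            · exact absurd hmm hstd
            · rfl
          rw [if_neg hn, if_neg hstd, if_pos hlg, hm2]
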